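-- pv_equiv track=rewrite | github.com/matzebond/4x4x4 | main.py | eval_stick
-- ===== SOURCE A (Python) =====
-- def eval_stick(stick):
--     player = None
--     free = 0
--     for x in stick:
--         if x == 0:
--             free += 1
--         elif player is None:
--             player = x
--         elif x != player:
--             return None, 0
--     return player, free
-- ===== SOURCE B (Python) =====
-- def eval_stick(stick):
--     vals = {x for x in stick if x != 0}
--     if len(vals) > 1:
--         return None, 0
--     player = next(iter(vals)) if vals else None
--     free = sum(1 for x in stick if x == 0)
--     return player, free
-- ===== Notes on version B (the rewrite author's own statement) =====
-- stated objective: simpler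
-- what changed: Replaces the early-returning loop that threads player/free state with a two-pass form: build the set of distinct non-zero values (more than one means contested), then count zeros separately.
import Mathlib
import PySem

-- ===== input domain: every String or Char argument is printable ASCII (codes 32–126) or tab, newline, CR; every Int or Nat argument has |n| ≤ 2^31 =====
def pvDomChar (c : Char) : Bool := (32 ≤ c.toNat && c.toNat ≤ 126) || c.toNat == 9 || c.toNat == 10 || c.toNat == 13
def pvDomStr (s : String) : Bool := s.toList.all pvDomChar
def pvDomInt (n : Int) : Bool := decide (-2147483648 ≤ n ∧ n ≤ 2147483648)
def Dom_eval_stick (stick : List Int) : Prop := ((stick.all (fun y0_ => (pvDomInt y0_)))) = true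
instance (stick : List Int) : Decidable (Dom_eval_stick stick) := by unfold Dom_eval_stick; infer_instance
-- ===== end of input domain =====

-- B replaces A's early-returning stateful loop by a two-pass form (distinct non-zero
-- value set, then a zero count); objective: simpler.

-- ===== PORT A =====
-- the for-loop of A, threading (player, free) and returning early on a conflict
def evalStickLoop : List Int → Option Int → Int → Option Int × Int
  | [], player, free => (player, free)
  | x :: xs, player, free =>
    if x = 0 then evalStickLoop xs player (free + 1)
    else
      match player with
      | none => evalStickLoop xs (some x) free
      | some p => if x ≠ p then (none, 0) else evalStickLoop xs (some p) free

def eval_stick (stick : List Int) : Option Int × Int :=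
  evalStickLoop stick none 0

-- ===== PORT B =====
def eval_stick_alt (stick : List Int) : Option Int × Int :=
  let vals : PySem.Set Int := PySem.Set.ofList (stick.filter (fun x => !(x == 0)))
  if 1 < vals.length then (none, 0)
  else
    (vals.head?, stick.foldl (fun acc x => if x == 0 then acc + 1 else acc) (0 : Int))

-- ===== PRECONDITION & SPEC =====
def Spec_eval_stick (stick : List Int) (out : Option Int × Int) : Prop := out = eval_stick_alt stick
instance (stick : List Int) (out : Option Int × Int) : Decidable (Spec_eval_stick stick out) := by unfold Spec_eval_stick; infer_instance

-- ===== CLAIM (what is proved, stated in full; the proofs are below) =====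
def Claim_equal_eval_stick : Prop := ∀ (stick : List Int), Dom_eval_stick stick → Spec_eval_stick stick (eval_stick stick)

-- ===== LEMMAS AND PROOFS =====

-- the zero count of B's second pass (definitionally B's foldl)
def czero (xs : List Int) : Int := xs.foldl (fun acc x => if x == 0 then acc + 1 else acc) 0

theorem czero_shift (xs : List Int) (c : Int) :
    xs.foldl (fun acc x => if x == 0 then acc + 1 else acc) c = c + czero xs := by
  induction xs generalizing c with
  | nil => simp [czero]
  | cons y ys ih =>
    by_cases hy : (y == 0) = true
    · simp only [czero, List.foldl_cons, if_pos hy]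
      rw [ih, ih]
      ring
    · simp only [czero, List.foldl_cons, if_neg hy]
      rw [ih, ih]
      ring

theorem czero_cons (y : Int) (ys : List Int) :
    czero (y :: ys) = (if y = 0 then 1 else 0) + czero ys := by
  have h1 : czero (y :: ys)
      = ys.foldl (fun acc x => if x == 0 then acc + 1 else acc)
          (if y == 0 then (0 : Int) + 1 else 0) := rfl
  rw [h1, czero_shift]
  by_cases hy : y = 0 <;> simp [hy]

theorem filter_cons_zero (y : Int) (ys : List Int) (hy : y = 0) :
    (y :: ys).filter (fun x => !(x == 0)) = ys.filter (fun x => !(x == 0)) := by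
  simp [hy]

theorem filter_cons_nonzero (y : Int) (ys : List Int) (hy : ¬ y = 0) :
    (y :: ys).filter (fun x => !(x == 0)) = y :: ys.filter (fun x => !(x == 0)) := by
  simp [hy]

-- A's loop once a player is fixed
theorem loop_some (xs : List Int) (p : Int) (free : Int) :
    evalStickLoop xs (some p) free =
      if (xs.filter (fun x => !(x == 0))).all (fun x => x == p) then
        (some p, free + czero xs)
      else (none, 0) := by
  induction xs generalizing free with
  | nil => simp [evalStickLoop, czero]
  | cons y ys ih =>
    by_cases hy : y = 0
    · rw [show evalStickLoop (y :: ys) (some p) free = evalStickLoop ys (some p) (free + 1) by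
        simp [evalStickLoop, hy]]
      rw [ih, czero_cons, filter_cons_zero y ys hy, if_pos hy]
      have h3 : free + 1 + czero ys = free + (1 + czero ys) := by ring
      rw [h3]
    · by_cases hp : y = p
      · subst hp
        rw [show evalStickLoop (y :: ys) (some y) free = evalStickLoop ys (some y) free by
          simp [evalStickLoop, hy]]
        rw [ih, czero_cons, filter_cons_nonzero y ys hy, List.all_cons, if_neg hy]
        simp only [beq_self_eq_true, Bool.true_and, zero_add]
      · rw [show evalStickLoop (y :: ys) (some p) free = (none, 0) by
          simp [evalStickLoop, hy, hp]]
        rw [filter_cons_nonzero y ys hy, List.all_cons]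
        have hb : (y == p) = false := by simp [hp]
        rw [hb]
        simp

-- A's loop with no player yet, characterised by the non-zero sublist
theorem loop_none (xs : List Int) (free : Int) :
    evalStickLoop xs none free =
      match xs.filter (fun x => !(x == 0)) with
      | [] => (none, free + czero xs)
      | v :: t =>
        if t.all (fun x => x == v) then (some v, free + czero xs) else (none, 0) := by
  induction xs generalizing free with
  | nil => simp [evalStickLoop, czero]
  | cons y ys ih =>
    by_cases hy : y = 0
    · rw [show evalStickLoop (y :: ys) none free = evalStickLoop ys none (free + 1) by
        simp [evalStickLoop, hy]]
      rw [ih, czero_cons, filter_cons_zero y ys hy, if_pos hy]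
      have h3 : free + 1 + czero ys = free + (1 + czero ys) := by ring
      rw [h3]
    · rw [show evalStickLoop (y :: ys) none free = evalStickLoop ys (some y) free by
        simp [evalStickLoop, hy]]
      rw [loop_some, czero_cons, filter_cons_nonzero y ys hy, if_neg hy]
      simp only [zero_add]

-- set(l) for a list whose elements all equal its head
theorem ofList_all_eq (v : Int) (t : List Int) (h : t.all (fun x => x == v)) :
    PySem.Set.ofList (v :: t) = [v] := by
  induction t with
  | nil => rfl
  | cons w ws ih =>
    simp only [List.all_cons, Bool.and_eq_true, beq_iff_eq] at h
    obtain ⟨hw, hws⟩ := h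
    have h2 : PySem.Set.ofList (v :: w :: ws) = PySem.Set.ofList (v :: ws) := by
      subst hw
      simp [PySem.Set.ofList, List.foldl, PySem.Set.add, PySem.Set.contains]
    rw [h2, ih]
    simpa using hws

-- set(l) has at least two elements when l's head is not everywhere repeated
theorem ofList_two_lt (v : Int) (t : List Int) (h : ¬ t.all (fun x => x == v)) :
    1 < (PySem.Set.ofList (v :: t)).length := by
  simp only [List.all_eq_true, beq_iff_eq, not_forall] at h
  obtain ⟨w, hw, hne⟩ := h
  have hv : v ∈ PySem.Set.ofList (v :: t) := by
    rw [PySem.Set.mem_ofList]; exact List.mem_cons_self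
  have hwmem : w ∈ PySem.Set.ofList (v :: t) := by
    rw [PySem.Set.mem_ofList]; exact List.mem_cons_of_mem _ hw
  rcases hl : PySem.Set.ofList (v :: t) with _ | ⟨a, _ | ⟨b, l⟩⟩
  · rw [hl] at hv; simp at hv
  · rw [hl] at hv hwmem
    simp at hv hwmem
    exact absurd (hwmem.trans hv.symm) hne
  · simp

-- ===== VERDICT (by name: the statement is the Claim_ definition above) =====
theorem eval_stick_spec : Claim_equal_eval_stick := by
  unfold Claim_equal_eval_stick Spec_eval_stick
  intro stick _
  unfold eval_stick eval_stick_alt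
  rw [show stick.foldl (fun acc x => if x == 0 then acc + 1 else acc) (0 : Int) = czero stick from rfl]
  rw [loop_none]
  cases hf : stick.filter (fun x => !(x == 0)) with
  | nil => simp [PySem.Set.ofList]
  | cons v t =>
    by_cases h : t.all (fun x => x == v)
    · rw [ofList_all_eq v t h]
      simp [h]
    · simp [h, ofList_two_lt v t h]
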